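-- pv_equiv track=rewrite | github.com/ohad1s/Intro_to_Python | SemB/TA13/first.py | q3
-- ===== SOURCE A (Python) =====
-- def q3(lst):
--     max_lst=[]
--     for i in range(len(lst)):
--         curr=[lst[i]]
--         for j in range(i+1,len(lst)):
--             if lst[j]>curr[-1]:
--                 curr.append(lst[j])
--         if len(curr)>len(max_lst):
--             max_lst=curr
--     return max_lst
-- ===== SOURCE B (Python) =====
-- def q3(lst):
--     # Next-greater-element jump pointers + DP on chain lengths; O(n) amortized.
--     n = len(lst)
--     if n == 0:
--         return []
--     nge = [n] * n
--     for i in range(n - 2, -1, -1):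
--         j = i + 1
--         while j < n and lst[j] <= lst[i]:
--             j = nge[j]
--         nge[i] = j
--     L = [0] * (n + 1)
--     for i in range(n - 1, -1, -1):
--         L[i] = 1 + L[nge[i]]
--     best = 0
--     for i in range(1, n):
--         if L[i] > L[best]:
--             best = i
--     out = []
--     i = best
--     while i < n:
--         out.append(lst[i])
--         i = nge[i]
--     return out
-- ===== Notes on version B (the rewrite author's own statement) =====
-- stated objective: faster
-- what changed: Replaces A's restart-a-greedy-scan-from-every-index O(n^2) nested loops by a single right-to-left next-greater-element jump-pointer pass with a DP on chain lengths and an O(n) pointer-following reconstruction.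
import Mathlib
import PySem

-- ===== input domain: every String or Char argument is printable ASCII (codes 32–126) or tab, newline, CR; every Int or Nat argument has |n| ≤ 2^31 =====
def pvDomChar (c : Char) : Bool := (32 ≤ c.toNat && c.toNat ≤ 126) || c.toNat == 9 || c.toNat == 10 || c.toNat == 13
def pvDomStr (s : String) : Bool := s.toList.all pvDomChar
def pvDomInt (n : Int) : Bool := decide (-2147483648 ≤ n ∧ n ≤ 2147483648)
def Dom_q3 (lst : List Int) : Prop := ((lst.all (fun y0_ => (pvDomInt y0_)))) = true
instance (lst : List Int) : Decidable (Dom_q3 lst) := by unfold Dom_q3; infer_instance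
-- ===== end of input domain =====

-- B replaces A's O(n^2) restart-from-every-index greedy scans by one O(n) right-to-left
-- next-greater-element jump-pointer pass, a DP on chain lengths, and pointer-following reconstruction.

-- ===== PORT A =====
-- literal port of Source A: for each start i, greedily extend by every later element
-- greater than the current last (curr[-1]); keep the first strictly longest chain.
def q3 (lst : List Int) : List Int :=
  (PySem.List.pyRange 0 (lst.length : Int) 1).foldl
    (fun max_lst i =>
      let curr :=
        (PySem.List.pyRange (i + 1) (lst.length : Int) 1).foldl
          (fun curr j =>
            if PySem.List.pyGetD lst j 0 > PySem.List.pyGetD curr (-1) 0 then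
              curr ++ [PySem.List.pyGetD lst j 0]
            else curr)
          [PySem.List.pyGetD lst i 0]
      if curr.length > max_lst.length then curr else max_lst)
    []

-- ===== PORT B =====
-- `while j < n and lst[j] <= v: j = nge[j]`; fuel = n is enough since each jump
-- strictly increases j (proved below); on exhaustion we return j, which is never reached.
def jumpLoop (lst : List Int) (nge : List Nat) (v : Int) : Nat → Nat → Nat
  | j, fuel + 1 =>
      if j < lst.length ∧ lst.getD j 0 ≤ v then
        jumpLoop lst nge v (nge.getD j lst.length) fuel
      else j
  | j, 0 => j

-- `while i < n: out.append(lst[i]); i = nge[i]`; fuel = n is enough (i strictly increases).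
def followLoop (lst : List Int) (nge : List Nat) : Nat → Nat → List Int
  | i, fuel + 1 =>
      if i < lst.length then
        lst.getD i 0 :: followLoop lst nge (nge.getD i lst.length) fuel
      else []
  | _, 0 => []

-- literal port of Source B (indices from pyRange are ≥ 0, so lst[i] is lst.getD i.toNat 0)
def q3_alt (lst : List Int) : List Int :=
  let n := lst.length
  if n = 0 then []
  else
    let nge :=
      (PySem.List.pyRange ((n : Int) - 2) (-1) (-1)).foldl
        (fun nge i =>
          nge.set i.toNat (jumpLoop lst nge (lst.getD i.toNat 0) (i.toNat + 1) n))
        (List.replicate n n)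
    let L :=
      (PySem.List.pyRange ((n : Int) - 1) (-1) (-1)).foldl
        (fun L i => L.set i.toNat (1 + L.getD (nge.getD i.toNat n) 0))
        ((List.replicate (n + 1) 0 : List Nat))
    let best :=
      (PySem.List.pyRange 1 (n : Int) 1).foldl
        (fun best i => if L.getD i.toNat 0 > L.getD best 0 then i.toNat else best)
        0
    followLoop lst nge best n

-- ===== PRECONDITION & SPEC =====
def Spec_q3 (lst : List Int) (out : List Int) : Prop := out = q3_alt lst
instance (lst : List Int) (out : List Int) : Decidable (Spec_q3 lst out) := by unfold Spec_q3; infer_instance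

-- ===== CLAIM (what is proved, stated in full; the proofs are below) =====
def Claim_equal_q3 : Prop := ∀ (lst : List Int), Dom_q3 lst → Spec_q3 lst (q3 lst)

-- ===== LEMMAS AND PROOFS =====

-- first index k ≥ j with lst[k] > v, or lst.length if none
def findFrom (lst : List Int) (v : Int) (j : Nat) : Nat :=
  if j < lst.length then (if lst.getD j 0 > v then j else findFrom lst v (j + 1))
  else lst.length
termination_by lst.length - j

lemma le_findFrom (lst : List Int) (v : Int) (j : Nat) (hj : j ≤ lst.length) :
    j ≤ findFrom lst v j := by
  unfold findFrom
  split
  · split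
    · exact le_refl j
    · rename_i h _
      exact le_trans (Nat.le_succ j) (le_findFrom lst v (j + 1) h)
  · omega
termination_by lst.length - j

lemma findFrom_le (lst : List Int) (v : Int) (j : Nat) : findFrom lst v j ≤ lst.length := by
  unfold findFrom
  split
  · split
    · omega
    · exact findFrom_le lst v (j + 1)
  · exact le_refl _
termination_by lst.length - j

-- the greedy left-to-right-maxima chain starting at index i
def chainFrom (lst : List Int) (i : Nat) : List Int :=
  if h : i < lst.length then
    lst.getD i 0 :: chainFrom lst (findFrom lst (lst.getD i 0) (i + 1))
  else []
termination_by lst.length - i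
decreasing_by
  have := le_findFrom lst (lst.getD i 0) (i + 1) h
  omega

lemma chainFrom_of_lt (lst : List Int) (i : Nat) (h : i < lst.length) :
    chainFrom lst i = lst.getD i 0 :: chainFrom lst (findFrom lst (lst.getD i 0) (i + 1)) := by
  rw [chainFrom]; simp [h]

lemma chainFrom_of_ge (lst : List Int) (i : Nat) (h : lst.length ≤ i) :
    chainFrom lst i = [] := by
  rw [chainFrom]; simp [Nat.not_lt.mpr h]

-- skipping past the elements ≤ w cannot skip an element > v when w ≤ v
lemma findFrom_skip (lst : List Int) (v w : Int) (hwv : w ≤ v) (j : Nat) :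
    findFrom lst v j = findFrom lst v (findFrom lst w j) := by
  by_cases h : j < lst.length
  · by_cases hw : lst.getD j 0 > w
    · have e1 : findFrom lst w j = j := by rw [findFrom, if_pos h, if_pos hw]
      rw [e1]
    · have hv : ¬ lst.getD j 0 > v := by omega
      have e1 : findFrom lst w j = findFrom lst w (j + 1) := by rw [findFrom, if_pos h, if_neg hw]
      have e2 : findFrom lst v j = findFrom lst v (j + 1) := by rw [findFrom, if_pos h, if_neg hv]
      rw [e2, e1, findFrom_skip lst v w hwv (j + 1)]
  · have e1 : findFrom lst w j = lst.length := by rw [findFrom, if_neg h]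
    have e2 : findFrom lst v j = lst.length := by rw [findFrom, if_neg h]
    have e3 : findFrom lst v lst.length = lst.length := by rw [findFrom, if_neg (lt_irrefl _)]
    rw [e1, e2, e3]
termination_by lst.length - j

-- A's inner loop, from any nonempty accumulator
lemma inner_eq (lst : List Int) (j : Nat) (c : List Int) (hc : c ≠ []) :
    (PySem.List.pyRange (j : Int) (lst.length : Int) 1).foldl
      (fun curr jj =>
        if PySem.List.pyGetD lst jj 0 > PySem.List.pyGetD curr (-1) 0 then
          curr ++ [PySem.List.pyGetD lst jj 0]
        else curr) c
    = c ++ chainFrom lst (findFrom lst (c.getLast hc) j) := by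
  by_cases h : j < lst.length
  · rw [PySem.List.pyRange_one_cons (by exact_mod_cast h), List.foldl_cons]
    simp only [PySem.List.pyGetD_natCast, PySem.List.pyGetD_neg_one c 0 hc]
    have hj1 : (j : Int) + 1 = ((j + 1 : Nat) : Int) := by push_cast; ring
    by_cases hgt : lst.getD j 0 > c.getLast hc
    · rw [if_pos hgt, hj1]
      have hne : c ++ [lst.getD j 0] ≠ [] := by simp
      rw [inner_eq lst (j + 1) _ hne]
      have hl : (c ++ [lst.getD j 0]).getLast hne = lst.getD j 0 := by
        rw [List.getLast_append]; simp
      rw [hl]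
      have hf : findFrom lst (c.getLast hc) j = j := by rw [findFrom, if_pos h, if_pos hgt]
      rw [hf, chainFrom_of_lt lst j h]
      simp
    · rw [if_neg hgt, hj1, inner_eq lst (j + 1) c hc]
      have hf : findFrom lst (c.getLast hc) j = findFrom lst (c.getLast hc) (j + 1) := by
        rw [findFrom, if_pos h, if_neg hgt]
      rw [hf]
  · rw [PySem.List.pyRange_one_eq_nil (by exact_mod_cast Nat.not_lt.mp h), List.foldl_nil]
    have hf : findFrom lst (c.getLast hc) j = lst.length := by rw [findFrom, if_neg h]
    rw [hf, chainFrom_of_ge lst _ (le_refl _)]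
    simp
termination_by lst.length - j

-- A's chain for start i equals chainFrom i
lemma innerA_eq_chainFrom (lst : List Int) (k : Nat) (hk : k < lst.length) :
    (PySem.List.pyRange ((k : Int) + 1) (lst.length : Int) 1).foldl
      (fun curr jj =>
        if PySem.List.pyGetD lst jj 0 > PySem.List.pyGetD curr (-1) 0 then
          curr ++ [PySem.List.pyGetD lst jj 0]
        else curr) [PySem.List.pyGetD lst (k : Int) 0]
    = chainFrom lst k := by
  have hne : [PySem.List.pyGetD lst (k : Int) 0] ≠ [] := by simp
  have hj1 : (k : Int) + 1 = ((k + 1 : Nat) : Int) := by push_cast; ring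
  rw [hj1, inner_eq lst (k + 1) _ hne]
  simp only [PySem.List.pyGetD_natCast, List.getLast_singleton]
  rw [chainFrom_of_lt lst k hk]
  simp

-- the jump loop computes findFrom, given correct pointers to its right
lemma jumpLoop_eq (lst : List Int) (g : List Nat) (v : Int) :
    ∀ (fuel j : Nat), j ≤ lst.length → lst.length - j ≤ fuel →
      (∀ k, j ≤ k → k < lst.length → g.getD k lst.length = findFrom lst (lst.getD k 0) (k + 1)) →
      jumpLoop lst g v j fuel = findFrom lst v j := by
  intro fuel
  induction fuel with
  | zero =>
    intro j hjn hfuel _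
    have hj : j = lst.length := by omega
    subst hj
    rw [findFrom, if_neg (lt_irrefl _)]
    rfl
  | succ fuel ih =>
    intro j hjn hfuel hg
    by_cases hcond : j < lst.length ∧ lst.getD j 0 ≤ v
    · have e : jumpLoop lst g v j (fuel + 1) = jumpLoop lst g v (g.getD j lst.length) fuel := by
        rw [jumpLoop, if_pos hcond]
      have hgj := hg j (le_refl j) hcond.1
      have hge : j + 1 ≤ findFrom lst (lst.getD j 0) (j + 1) :=
        le_findFrom lst _ (j + 1) (by omega)
      have hle : findFrom lst (lst.getD j 0) (j + 1) ≤ lst.length := findFrom_le lst _ _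
      rw [e, hgj, ih _ hle (by omega) (fun k hk hk2 => hg k (by omega) hk2)]
      have e2 : findFrom lst v j = findFrom lst v (j + 1) := by
        rw [findFrom, if_pos hcond.1, if_neg (by exact not_lt.mpr hcond.2)]
      rw [e2, findFrom_skip lst v (lst.getD j 0) hcond.2 (j + 1)]
    · have e : jumpLoop lst g v j (fuel + 1) = j := by rw [jumpLoop, if_neg hcond]
      rw [e]
      by_cases hj : j < lst.length
      · have hv : lst.getD j 0 > v := by
          rcases not_and_or.mp hcond with h1 | h2
          · exact absurd hj h1
          · omega
        rw [findFrom, if_pos hj, if_pos hv]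
      · have hj' : j = lst.length := by omega
        subst hj'
        rw [findFrom, if_neg (lt_irrefl _)]

-- the nge fold fills in findFrom for every index
lemma nge_fold (lst : List Int) :
    ∀ (m : Nat) (g : List Nat), m < lst.length → g.length = lst.length →
      (∀ k, m ≤ k → k < lst.length → g.getD k lst.length = findFrom lst (lst.getD k 0) (k + 1)) →
      let r := (PySem.List.pyRange ((m : Int) - 1) (-1) (-1)).foldl
        (fun nge i =>
          nge.set i.toNat (jumpLoop lst nge (lst.getD i.toNat 0) (i.toNat + 1) lst.length))
        g
      r.length = lst.length ∧
        ∀ k, k < lst.length → r.getD k lst.length = findFrom lst (lst.getD k 0) (k + 1) := by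
  intro m
  induction m with
  | zero =>
    intro g hm hlen hinv
    have hnil : PySem.List.pyRange (((0 : Nat) : Int) - 1) (-1) (-1) = [] :=
      PySem.List.pyRange_neg_one_eq_nil (by norm_num)
    rw [hnil]
    exact ⟨hlen, fun k hk => hinv k (Nat.zero_le k) hk⟩
  | succ m ih =>
    intro g hm hlen hinv
    have hcast : (((m + 1 : Nat) : Int) - 1) = ((m : Nat) : Int) := by push_cast; ring
    rw [hcast, PySem.List.pyRange_neg_one_cons (by omega), List.foldl_cons]
    have htn : ((m : Nat) : Int).toNat = m := Int.toNat_natCast m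
    rw [htn]
    have hjump : jumpLoop lst g (lst.getD m 0) (m + 1) lst.length
        = findFrom lst (lst.getD m 0) (m + 1) :=
      jumpLoop_eq lst g (lst.getD m 0) lst.length (m + 1) (by omega) (by omega)
        (fun k hk hk2 => hinv k (by omega) hk2)
    refine ih (g.set m (jumpLoop lst g (lst.getD m 0) (m + 1) lst.length))
      (by omega) (by rw [List.length_set]; exact hlen) ?_
    intro k hk hk2
    by_cases hkm : k = m
    · subst hkm
      rw [List.getD_eq_getElem?_getD, List.getElem?_set_self (by omega), Option.getD_some]
      exact hjump
    · have hkm' : m < k := lt_of_le_of_ne hk (fun e => hkm e.symm)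
      rw [List.getD_eq_getElem?_getD, List.getElem?_set_ne (by omega), ← List.getD_eq_getElem?_getD]
      exact hinv k (by omega) hk2

-- the L fold fills in chain lengths
lemma L_fold (lst : List Int) (nge : List Nat)
    (hnge : ∀ k, k < lst.length → nge.getD k lst.length = findFrom lst (lst.getD k 0) (k + 1)) :
    ∀ (m : Nat) (g : List Nat), m ≤ lst.length → g.length = lst.length + 1 →
      (∀ k, m ≤ k → k ≤ lst.length → g.getD k 0 = (chainFrom lst k).length) →
      let r := (PySem.List.pyRange ((m : Int) - 1) (-1) (-1)).foldl
        (fun L i => L.set i.toNat (1 + L.getD (nge.getD i.toNat lst.length) 0)) g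
      ∀ k, k ≤ lst.length → r.getD k 0 = (chainFrom lst k).length := by
  intro m
  induction m with
  | zero =>
    intro g hm hlen hinv
    have hnil : PySem.List.pyRange (((0 : Nat) : Int) - 1) (-1) (-1) = [] :=
      PySem.List.pyRange_neg_one_eq_nil (by norm_num)
    rw [hnil]
    exact fun k hk => hinv k (Nat.zero_le k) hk
  | succ m ih =>
    intro g hm hlen hinv
    have hcast : (((m + 1 : Nat) : Int) - 1) = ((m : Nat) : Int) := by push_cast; ring
    rw [hcast, PySem.List.pyRange_neg_one_cons (by omega), List.foldl_cons]
    have htn : ((m : Nat) : Int).toNat = m := Int.toNat_natCast m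
    rw [htn]
    have hmn : m < lst.length := by omega
    have hf := hnge m hmn
    have hge : m + 1 ≤ findFrom lst (lst.getD m 0) (m + 1) := le_findFrom lst _ (m + 1) (by omega)
    have hle : findFrom lst (lst.getD m 0) (m + 1) ≤ lst.length := findFrom_le lst _ _
    have hval : g.getD (nge.getD m lst.length) 0 = (chainFrom lst (findFrom lst (lst.getD m 0) (m + 1))).length := by
      rw [hf]
      exact hinv _ (by omega) hle
    refine ih (g.set m (1 + g.getD (nge.getD m lst.length) 0))
      (by omega) (by rw [List.length_set]; exact hlen) ?_
    intro k hk hk2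
    by_cases hkm : k = m
    · subst hkm
      rw [List.getD_eq_getElem?_getD, List.getElem?_set_self (by omega), Option.getD_some, hval]
      rw [chainFrom_of_lt lst k hmn, List.length_cons]
      omega
    · have hkm' : m < k := lt_of_le_of_ne hk (fun e => hkm e.symm)
      rw [List.getD_eq_getElem?_getD, List.getElem?_set_ne (by omega), ← List.getD_eq_getElem?_getD]
      exact hinv k (by omega) hk2

-- following correct pointers reconstructs the chain
lemma followLoop_eq (lst : List Int) (nge : List Nat)
    (hnge : ∀ k, k < lst.length → nge.getD k lst.length = findFrom lst (lst.getD k 0) (k + 1)) :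
    ∀ (fuel i : Nat), i ≤ lst.length → lst.length - i ≤ fuel →
      followLoop lst nge i fuel = chainFrom lst i := by
  intro fuel
  induction fuel with
  | zero =>
    intro i hin hfuel
    have : i = lst.length := by omega
    subst this
    rw [chainFrom_of_ge lst _ (le_refl _)]
    rfl
  | succ fuel ih =>
    intro i hin hfuel
    by_cases hi : i < lst.length
    · rw [followLoop, if_pos hi, hnge i hi]
      have hge : i + 1 ≤ findFrom lst (lst.getD i 0) (i + 1) := le_findFrom lst _ (i + 1) (by omega)
      have hle : findFrom lst (lst.getD i 0) (i + 1) ≤ lst.length := findFrom_le lst _ _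
      rw [ih _ hle (by omega), chainFrom_of_lt lst i hi]
    · rw [followLoop, if_neg hi, chainFrom_of_ge lst _ (by omega)]

-- A's outer fold keeps the first strictly longest chain; B's keeps the first strict argmax index
-- B's best fold stays below lst.length
lemma best_fold_lt (lst : List Int) (L : List Nat) (a : Int) (b : Nat) (hb : b < lst.length) :
    (PySem.List.pyRange a (lst.length : Int) 1).foldl
      (fun best i => if L.getD i.toNat 0 > L.getD best 0 then i.toNat else best) b
    < lst.length := by
  by_cases h : a < (lst.length : Int)
  · rw [PySem.List.pyRange_one_cons h, List.foldl_cons]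
    by_cases hc : L.getD a.toNat 0 > L.getD b 0
    · rw [if_pos hc]
      exact best_fold_lt lst L (a + 1) _ (by omega)
    · rw [if_neg hc]
      exact best_fold_lt lst L (a + 1) b hb
  · rw [PySem.List.pyRange_one_eq_nil (not_lt.mp h), List.foldl_nil]
    exact hb
termination_by ((lst.length : Int) - a).toNat
decreasing_by all_goals omega

-- A's outer fold keeps the first strictly longest chain; B's keeps the first strict argmax index
lemma outer_bridge (lst : List Int) (L : List Nat)
    (hL : ∀ k, k ≤ lst.length → L.getD k 0 = (chainFrom lst k).length)
    (k : Nat) (_hk : k ≤ lst.length) (b : Nat) (hb : b < lst.length) :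
      (PySem.List.pyRange (k : Int) (lst.length : Int) 1).foldl
        (fun max_lst i =>
          let curr :=
            (PySem.List.pyRange (i + 1) (lst.length : Int) 1).foldl
              (fun curr j =>
                if PySem.List.pyGetD lst j 0 > PySem.List.pyGetD curr (-1) 0 then
                  curr ++ [PySem.List.pyGetD lst j 0]
                else curr)
              [PySem.List.pyGetD lst i 0]
          if curr.length > max_lst.length then curr else max_lst)
        (chainFrom lst b)
      = chainFrom lst ((PySem.List.pyRange (k : Int) (lst.length : Int) 1).foldl
          (fun best i => if L.getD i.toNat 0 > L.getD best 0 then i.toNat else best) b) := by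
  by_cases h : k < lst.length
  · rw [PySem.List.pyRange_one_cons (show (k : Int) < (lst.length : Int) by exact_mod_cast h),
      List.foldl_cons, List.foldl_cons]
    dsimp only
    rw [innerA_eq_chainFrom lst k h, Int.toNat_natCast, hL k (le_of_lt h), hL b (le_of_lt hb),
      show (k : Int) + 1 = ((k + 1 : Nat) : Int) by push_cast; ring]
    by_cases hc : (chainFrom lst k).length > (chainFrom lst b).length
    · rw [if_pos hc, if_pos hc]
      exact outer_bridge lst L hL (k + 1) (by omega) k h
    · rw [if_neg hc, if_neg hc]
      exact outer_bridge lst L hL (k + 1) (by omega) b hb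
  · rw [PySem.List.pyRange_one_eq_nil (by exact_mod_cast Nat.not_lt.mp h), List.foldl_nil,
      List.foldl_nil]
termination_by lst.length - k

-- ===== VERDICT (by name: the statement is the Claim_ definition above) =====
theorem q3_spec : Claim_equal_q3 := by
  intro lst _
  unfold Spec_q3
  by_cases hn : lst.length = 0
  · have hnil : lst = [] := List.length_eq_zero_iff.mp hn
    subst hnil
    rfl
  · have hn1 : 0 < lst.length := Nat.pos_of_ne_zero hn
    simp only [q3_alt]
    rw [if_neg hn]
    have hrange : ((lst.length : Int) - 2) = (((lst.length - 1 : Nat) : Int) - 1) := by omega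
    rw [hrange]
    obtain ⟨hlenN, hcorr⟩ := nge_fold lst (lst.length - 1) (List.replicate lst.length lst.length)
      (by omega) (by simp)
      (fun k _hk hk2 => by
        have hke : k = lst.length - 1 := by omega
        subst hke
        rw [List.getD_eq_getElem?_getD, List.getElem?_replicate_of_lt hk2, Option.getD_some,
          show lst.length - 1 + 1 = lst.length by omega, findFrom, if_neg (lt_irrefl _)])
    have hLcorr := L_fold lst _ hcorr lst.length
      ((List.replicate (lst.length + 1) 0 : List Nat)) (le_refl _) (by simp)
      (fun k _hk hk2 => by
        have hke : k = lst.length := by omega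
        subst hke
        rw [List.getD_eq_getElem?_getD, List.getElem?_replicate_of_lt (by omega), Option.getD_some,
          chainFrom_of_ge lst _ (le_refl _)]
        rfl)
    rw [followLoop_eq lst _ hcorr lst.length _
      (le_of_lt (best_fold_lt lst _ 1 0 hn1)) (by omega)]
    rw [q3, PySem.List.pyRange_one_cons (show (0 : Int) < (lst.length : Int) by exact_mod_cast hn1),
      List.foldl_cons]
    dsimp only
    have h0 := innerA_eq_chainFrom lst 0 hn1
    rw [Nat.cast_zero] at h0
    rw [h0]
    have hpos : (chainFrom lst 0).length > ([] : List Int).length := by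
      rw [chainFrom_of_lt lst 0 hn1]; simp
    rw [if_pos hpos,
      show (0 : Int) + 1 = ((1 : Nat) : Int) by norm_num,
      outer_bridge lst _ hLcorr 1 (by omega) 0 hn1]
    norm_num
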